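-- pv_equiv track=rewrite | github.com/carterlain/ENGR-102 | word_puzzle.py | get_valid_letters
-- ===== SOURCE A (Python) =====
-- def get_valid_letters(puzzle):
--
--     clean_puzzle = puzzle.replace(" ","") # Remove all spaces
--     clean_puzzle = clean_puzzle.replace(",","") #Remove all commas
--     clean_puzzle = clean_puzzle.replace("|","") #Remove all vert bars
--     valid_letter_string = ''
--     for i in range(0,len(clean_puzzle)):
--       if clean_puzzle[i] not in valid_letter_string:  #Build string without dupe letters
--           valid_letter_string += clean_puzzle[i]
--           if len(valid_letter_string) == 10:
--               break
--     return(valid_letter_string)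
-- ===== SOURCE B (Python) =====
-- def get_valid_letters(puzzle):
--     cleaned = puzzle.replace(" ", "").replace(",", "").replace("|", "")
--     return ''.join(sorted(set(cleaned), key=cleaned.index))[:10]
-- ===== Notes on version B (the rewrite author's own statement) =====
-- stated objective: alternative
-- what changed: Replaces A's single-pass accumulate-with-membership-test-and-break-at-10 loop by a different algorithm: build the set of distinct characters of the cleaned string, sort it by each character's first-occurrence index (sorted(set(cleaned), key=cleaned.index)), and truncate with [:10].
import Mathlib
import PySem

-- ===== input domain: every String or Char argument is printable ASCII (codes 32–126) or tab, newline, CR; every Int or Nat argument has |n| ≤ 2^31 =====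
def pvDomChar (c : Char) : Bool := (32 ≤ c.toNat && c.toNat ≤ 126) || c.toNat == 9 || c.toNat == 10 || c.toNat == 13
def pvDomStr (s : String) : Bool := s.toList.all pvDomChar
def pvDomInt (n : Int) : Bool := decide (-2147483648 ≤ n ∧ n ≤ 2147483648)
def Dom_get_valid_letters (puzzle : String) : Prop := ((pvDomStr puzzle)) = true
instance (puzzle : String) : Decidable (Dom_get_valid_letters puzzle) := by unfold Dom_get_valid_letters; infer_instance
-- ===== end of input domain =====

-- B replaces A's accumulate-and-break-at-10 loop by a different algorithm: collect the SET of
-- distinct characters, sort it by each character's first-occurrence index, and slice [:10].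

-- ===== PORT A =====
-- A's for-loop over range(0, len(clean_puzzle)) visiting clean_puzzle[i], with the
-- membership test, append, and break at length 10, as structural recursion over the chars.
def getA_loop : List Char → List Char → List Char
  | [], acc => acc
  | c :: rest, acc =>
    if acc.contains c then getA_loop rest acc
    else
      let acc' := acc ++ [c]
      if acc'.length == 10 then acc' else getA_loop rest acc'

def get_valid_letters (puzzle : String) : String :=
  let clean_puzzle := PySem.Str.replace (PySem.Str.replace (PySem.Str.replace puzzle " " "") "," "") "|" ""
  String.mk (getA_loop clean_puzzle.toList [])

-- ===== PORT B =====
-- B: chained replaces, then ''.join(sorted(set(cleaned), key=cleaned.index))[:10].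
-- cleaned.index(c) never raises here since every c ∈ set(cleaned) occurs in cleaned,
-- so (index? … ).getD 0 is exact.
def get_valid_letters_alt (puzzle : String) : String :=
  let cleaned := PySem.Str.replace (PySem.Str.replace (PySem.Str.replace puzzle " " "") "," "") "|" ""
  String.mk (PySem.List.slice
    (PySem.List.sorted (PySem.Set.ofList cleaned.toList)
      (fun c => ((PySem.List.index? cleaned.toList c).getD 0 : Nat)) false)
    none (some 10))

-- ===== PRECONDITION & SPEC =====
def Spec_get_valid_letters (puzzle : String) (out : String) : Prop := out = get_valid_letters_alt puzzle
instance (puzzle : String) (out : String) : Decidable (Spec_get_valid_letters puzzle out) := by unfold Spec_get_valid_letters; infer_instance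

-- ===== CLAIM (what is proved, stated in full; the proofs are below) =====
def Claim_equal_get_valid_letters : Prop := ∀ (puzzle : String), Dom_get_valid_letters puzzle → Spec_get_valid_letters puzzle (get_valid_letters puzzle)

-- ===== LEMMAS AND PROOFS =====

theorem update_cons (acc : List Char) (c : Char) (cs : List Char) :
    PySem.Set.update acc (c :: cs) = PySem.Set.update (PySem.Set.add acc c) cs := by
  simp [PySem.Set.update, List.foldl]

theorem prefix_update (cs : List Char) : ∀ acc : List Char, acc <+: PySem.Set.update acc cs := by
  induction cs with
  | nil => intro acc; simp [PySem.Set.update]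
  | cons c cs ih =>
    intro acc
    rw [update_cons]
    refine List.IsPrefix.trans ?_ (ih (PySem.Set.add acc c))
    rw [PySem.Set.add_eq_ite]
    split
    · exact List.prefix_refl acc
    · exact ⟨[c], rfl⟩

theorem getA_loop_eq_take (cs : List Char) : ∀ acc : List Char,
    acc.length < 10 → getA_loop cs acc = (PySem.Set.update acc cs).take 10 := by
  induction cs with
  | nil =>
    intro acc h
    simp [getA_loop, PySem.Set.update, List.take_of_length_le (Nat.le_of_lt h)]
  | cons c cs ih =>
    intro acc h
    rw [update_cons, getA_loop]
    by_cases hc : acc.contains c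
    · rw [if_pos hc, PySem.Set.add_of_mem (by simpa using hc)]
      exact ih acc h
    · rw [if_neg hc, PySem.Set.add_of_not_mem (by simpa using hc)]
      by_cases h10 : (acc ++ [c]).length = 10
      · rw [if_pos (by simpa using h10)]
        obtain ⟨t, ht⟩ := prefix_update cs (acc ++ [c])
        rw [← ht, ← h10, List.take_left]
      · rw [if_neg (by simpa using h10)]
        exact ih (acc ++ [c]) (by simp at h10 ⊢; omega)

-- the distinct characters, in first-occurrence order, have strictly increasing first indices
theorem ofList_pairwise_index (L : List Char) :
    (PySem.Set.ofList L).Pairwise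
      (fun a b => ((PySem.List.index? L a).getD 0 : Nat) < ((PySem.List.index? L b).getD 0 : Nat)) := by
  induction L using List.reverseRecOn with
  | nil => simp [PySem.Set.ofList]
  | append_singleton L x ih =>
    rw [PySem.Set.ofList_append_singleton]
    by_cases hx : x ∈ L
    · rw [PySem.Set.add_of_mem (by simpa [PySem.Set.mem_ofList] using hx)]
      refine ih.imp_of_mem ?_
      intro a b ha hb hab
      rw [PySem.List.index?_append_of_mem [x] (by simpa [PySem.Set.mem_ofList] using ha),
          PySem.List.index?_append_of_mem [x] (by simpa [PySem.Set.mem_ofList] using hb)]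
      exact hab
    · rw [PySem.Set.add_of_not_mem (by simpa [PySem.Set.mem_ofList] using hx)]
      rw [List.pairwise_append]
      refine ⟨?_, by simp, ?_⟩
      · refine ih.imp_of_mem ?_
        intro a b ha hb hab
        rw [PySem.List.index?_append_of_mem [x] (by simpa [PySem.Set.mem_ofList] using ha),
            PySem.List.index?_append_of_mem [x] (by simpa [PySem.Set.mem_ofList] using hb)]
        exact hab
      · intro a ha b hb
        rw [List.mem_singleton] at hb
        have ha' : a ∈ L := by simpa [PySem.Set.mem_ofList] using ha
        rw [hb, PySem.List.index?_append_of_mem [x] ha',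
            PySem.List.index?_append_singleton_self L x hx]
        obtain ⟨k, hk⟩ := (PySem.List.index?_isSome_iff L a).2 ha' |> Option.isSome_iff_exists.1
        rw [hk]
        obtain ⟨hlt, _, _⟩ := PySem.List.getElem_of_index?_eq_some hk
        simpa using hlt

-- sorting the distinct characters by first index returns them in first-occurrence order
theorem sorted_ofList_by_index (L : List Char) :
    PySem.List.sorted (PySem.Set.ofList L)
      (fun c => ((PySem.List.index? L c).getD 0 : Nat)) false = PySem.Set.ofList L :=
  PySem.List.sorted_eq_of_perm_of_pairwise_lt _ _ _ (List.Perm.refl _) (ofList_pairwise_index L)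

-- ===== VERDICT (by name: the statement is the Claim_ definition above) =====
theorem get_valid_letters_spec : Claim_equal_get_valid_letters := by
  intro puzzle _
  unfold Spec_get_valid_letters get_valid_letters get_valid_letters_alt
  simp only []
  have h2 : ∀ L : List Char,
      PySem.List.slice
        (PySem.List.sorted (PySem.Set.ofList L)
          (fun c => ((PySem.List.index? L c).getD 0 : Nat)) false) none (some 10)
      = getA_loop L [] := by
    intro L
    rw [sorted_ofList_by_index,
        PySem.List.slice_to _ (by norm_num : (0:Int) ≤ 10),
        PySem.Set.ofList_eq_foldl, getA_loop_eq_take L [] (by simp)]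
    rfl
  rw [h2]
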